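-- pv_equiv track=rewrite | github.com/zhenfelix/OnlineJudgeCodings | Codeforces/1535C - Unstable String.py | solve
-- ===== SOURCE A (Python) =====
-- def solve(s):
--     n = len(s)
--     p1 = p2 = -1
--     ans = 0
--     for i in range(n):
--         if s[i] in '01':
--             ch = int(s[i])
--             if (i&1) == (ch&1):
--                 p1 = i
--             else:
--                 p2 = i
--         ans += i-min(p1,p2)
--     return ans
-- ===== SOURCE B (Python) =====
-- def solve(s):
--     # inclusion-exclusion over maximal compatible runs, triangular sums flushed at run ends
--     total = 0
--     runA = runB = runQ = 0
--     for i, c in enumerate(s):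
--         if c in '01':
--             ch = int(c)
--             if (i & 1) == (ch & 1):
--                 runA += 1
--                 total += runB * (runB + 1) // 2
--                 runB = 0
--             else:
--                 runB += 1
--                 total += runA * (runA + 1) // 2
--                 runA = 0
--             total -= runQ * (runQ + 1) // 2
--             runQ = 0
--         else:
--             runA += 1
--             runB += 1
--             runQ += 1
--     return total + runA * (runA + 1) // 2 + runB * (runB + 1) // 2 - runQ * (runQ + 1) // 2
-- ===== Notes on version B (the rewrite author's own statement) =====
-- stated objective: alternative
-- what changed: Replaces A's tracking of the two last incompatible indices (adding i - min(p1,p2) at every position) with inclusion-exclusion over maximal compatible runs: one pass keeps three run lengths and flushes L*(L+1)//2 triangular counts only when a run ends, avoiding the per-character min() call and index arithmetic.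
import Mathlib
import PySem

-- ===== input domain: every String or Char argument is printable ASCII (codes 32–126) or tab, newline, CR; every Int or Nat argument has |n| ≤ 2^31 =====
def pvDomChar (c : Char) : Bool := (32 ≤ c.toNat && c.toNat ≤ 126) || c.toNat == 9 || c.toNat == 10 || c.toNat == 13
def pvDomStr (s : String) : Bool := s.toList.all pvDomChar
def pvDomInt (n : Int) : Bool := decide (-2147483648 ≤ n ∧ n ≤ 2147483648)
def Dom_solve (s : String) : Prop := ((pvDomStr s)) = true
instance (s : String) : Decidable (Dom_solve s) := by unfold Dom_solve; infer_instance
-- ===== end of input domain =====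

-- B replaces A's last-mismatch-index tracking by run-length inclusion–exclusion with
-- triangular sums over maximal compatible runs (objective: alternative, same O(n) cost).

-- ===== PORT A =====
-- A's 'for i in range(n)' with s[i], carrying (p1, p2, ans), rendered as structural
-- recursion over the characters with the index i carried explicitly.
def solveGo (i p1 p2 ans : Int) : List Char → Int
  | [] => ans
  | c :: rest =>
    if c = '0' ∨ c = '1' then
      if i % 2 = (if c = '1' then (1 : Int) else 0) % 2 then
        solveGo (i + 1) i p2 (ans + (i - min i p2)) rest
      else
        solveGo (i + 1) p1 i (ans + (i - min p1 i)) rest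
    else
      solveGo (i + 1) p1 p2 (ans + (i - min p1 p2)) rest

def solve (s : String) : Int := solveGo 0 (-1) (-1) 0 s.toList

-- ===== PORT B =====
-- r*(r+1)//2 of Source B (Python floor division, exact here)
def triI (r : Int) : Int := PySem.Int.floordiv (r * (r + 1)) 2

def altGo (i rA rB rQ tot : Int) : List Char → Int
  | [] => tot + triI rA + triI rB - triI rQ
  | c :: rest =>
    if c = '0' ∨ c = '1' then
      if i % 2 = (if c = '1' then (1 : Int) else 0) % 2 then
        altGo (i + 1) (rA + 1) 0 0 (tot + triI rB - triI rQ) rest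
      else
        altGo (i + 1) 0 (rB + 1) 0 (tot + triI rA - triI rQ) rest
    else
      altGo (i + 1) (rA + 1) (rB + 1) (rQ + 1) tot rest

def solve_alt (s : String) : Int := altGo 0 0 0 0 0 s.toList

-- ===== PRECONDITION & SPEC =====
def Spec_solve (s : String) (out : Int) : Prop := out = solve_alt s
instance (s : String) (out : Int) : Decidable (Spec_solve s out) := by unfold Spec_solve; infer_instance

-- ===== CLAIM (what is proved, stated in full; the proofs are below) =====
def Claim_equal_solve : Prop := ∀ (s : String), Dom_solve s → Spec_solve s (solve s)

-- ===== LEMMAS AND PROOFS =====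
theorem triI_zero : triI 0 = 0 := by decide

theorem triI_step (r : Int) : triI (r + 1) = triI r + r + 1 := by
  obtain ⟨k, hk⟩ := Int.even_mul_succ_self r
  have h2 : (r + 1) * (r + 1 + 1) = k + k + 2 * (r + 1) := by linear_combination hk
  unfold triI
  rw [PySem.Int.floordiv_eq_ediv_of_pos (by norm_num),
      PySem.Int.floordiv_eq_ediv_of_pos (by norm_num), hk, h2]
  omega

theorem go_eq (cs : List Char) : ∀ (i p1 p2 ans rA rB rQ tot : Int),
    p1 ≤ i - 1 → p2 ≤ i - 1 →
    rA = i - 1 - p2 → rB = i - 1 - p1 → rQ = min rA rB →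
    ans = tot + triI rA + triI rB - triI rQ →
    solveGo i p1 p2 ans cs = altGo i rA rB rQ tot cs := by
  induction cs with
  | nil =>
    intro i p1 p2 ans rA rB rQ tot _ _ _ _ _ hans
    simpa [solveGo, altGo] using hans
  | cons c rest ih =>
    intro i p1 p2 ans rA rB rQ tot h1 h2 hA hB hQ hans
    simp only [solveGo, altGo]
    by_cases hc : c = '0' ∨ c = '1'
    · rw [if_pos hc, if_pos hc]
      by_cases hp : i % 2 = (if c = '1' then (1 : Int) else 0) % 2
      · rw [if_pos hp, if_pos hp]
        exact ih _ _ _ _ _ _ _ _ (by omega) (by omega) (by omega) (by omega)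
          (by omega) (by simp only [triI_step, triI_zero]; omega)
      · rw [if_neg hp, if_neg hp]
        exact ih _ _ _ _ _ _ _ _ (by omega) (by omega) (by omega) (by omega)
          (by omega) (by simp only [triI_step, triI_zero]; omega)
    · rw [if_neg hc, if_neg hc]
      exact ih _ _ _ _ _ _ _ _ (by omega) (by omega) (by omega) (by omega)
        (by omega) (by simp only [triI_step]; omega)

-- ===== VERDICT (by name: the statement is the Claim_ definition above) =====
theorem solve_spec : Claim_equal_solve := by
  intro s _
  unfold Spec_solve solve solve_alt
  exact go_eq s.toList 0 (-1) (-1) 0 0 0 0 0 (by omega) (by omega) (by omega)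
    (by omega) (by omega) (by simp [triI_zero])
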